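-- pv_equiv track=rewrite | github.com/yangjzjhon-coder/quant-lab | src/quant_lab/backtest/portfolio.py | _dominant_regime_label
-- ===== SOURCE A (Python) =====
-- def _dominant_regime_label(regime_counts: dict[str, int]) -> str:
--     total = sum(regime_counts.values())
--     if total <= 0:
--         return "flat"
--     top_value = max(regime_counts.values())
--     leaders = [key for key, value in regime_counts.items() if value == top_value and value > 0]
--     if len(leaders) != 1:
--         return "mixed"
--     return leaders[0]
-- ===== SOURCE B (Python) =====
-- def _dominant_regime_label(regime_counts: dict[str, int]) -> str:
--     total = 0
--     best_value = None
--     best_key = None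
--     leader_count = 0
--     for key, value in regime_counts.items():
--         total += value
--         if best_value is None or value > best_value:
--             best_value, best_key, leader_count = value, key, 1
--         elif value == best_value:
--             leader_count += 1
--     if total <= 0:
--         return "flat"
--     if leader_count != 1:
--         return "mixed"
--     return best_key
-- ===== Notes on version B (the rewrite author's own statement) =====
-- stated objective: alternative
-- what changed: A's three separate passes (sum of values, max of values, list comprehension collecting leaders) are fused into one loop over the items that maintains a running total, best value/key and a leader count, with the label decided from that state afterwards.
import Mathlib
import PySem

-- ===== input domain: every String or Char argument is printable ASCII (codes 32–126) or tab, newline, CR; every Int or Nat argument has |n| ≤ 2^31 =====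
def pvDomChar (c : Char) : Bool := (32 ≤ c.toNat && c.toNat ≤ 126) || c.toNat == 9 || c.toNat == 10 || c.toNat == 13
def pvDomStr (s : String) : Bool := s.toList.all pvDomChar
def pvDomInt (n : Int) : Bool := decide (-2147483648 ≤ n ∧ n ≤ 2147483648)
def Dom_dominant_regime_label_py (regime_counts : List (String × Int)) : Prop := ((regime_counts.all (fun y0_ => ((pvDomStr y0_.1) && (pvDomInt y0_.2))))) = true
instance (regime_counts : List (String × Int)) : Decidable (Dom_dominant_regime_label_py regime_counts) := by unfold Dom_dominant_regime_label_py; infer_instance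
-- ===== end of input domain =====

-- B replaces A's three separate passes (sum, max, leaders-comprehension) by one loop
-- maintaining total, best value/key and a leader count (objective: alternative decomposition).

-- ===== PORT A =====
-- literal port of A: sum of values; max of values; list of leader keys; length test
def dominant_regime_label_py (regime_counts : List (String × Int)) : String :=
  let values := regime_counts.map (fun kv => kv.2)
  let total := values.sum
  if total ≤ 0 then "flat"
  else
    match PySem.List.max? values (fun v => v) with
    | none => "flat"  -- unreachable: total > 0 forces a non-empty dict (Python's max would raise only here)
    | some top_value =>
      let leaders := (regime_counts.filter (fun kv => kv.2 == top_value && decide (0 < kv.2))).map (fun kv => kv.1)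
      if leaders.length ≠ 1 then "mixed" else leaders.headI

-- ===== PORT B =====
-- one step of B's single loop over the items: state = (total, best (value, key), leader_count)
def pvB_step (s : Int × Option (Int × String) × Nat) (kv : String × Int) : Int × Option (Int × String) × Nat :=
  match s with
  | (total, none, _) => (total + kv.2, some (kv.2, kv.1), 1)
  | (total, some (bv, bk), lc) =>
    if bv < kv.2 then (total + kv.2, some (kv.2, kv.1), 1)
    else if kv.2 = bv then (total + kv.2, some (bv, bk), lc + 1)
    else (total + kv.2, some (bv, bk), lc)

def dominant_regime_label_py_alt (regime_counts : List (String × Int)) : String :=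
  let st := regime_counts.foldl pvB_step ((0 : Int), (none : Option (Int × String)), (0 : Nat))
  if st.1 ≤ 0 then "flat"
  else if st.2.2 ≠ 1 then "mixed"
  else match st.2.1 with
       | some (_, bk) => bk
       | none => "flat"  -- unreachable: total > 0 forces best_key to be set

-- ===== PRECONDITION & SPEC =====
def Spec_dominant_regime_label_py (regime_counts : List (String × Int)) (out : String) : Prop := out = dominant_regime_label_py_alt regime_counts
instance (regime_counts : List (String × Int)) (out : String) : Decidable (Spec_dominant_regime_label_py regime_counts out) := by unfold Spec_dominant_regime_label_py; infer_instance

-- ===== CLAIM (what is proved, stated in full; the proofs are below) =====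
def Claim_equal_dominant_regime_label_py : Prop := ∀ (regime_counts : List (String × Int)), Dom_dominant_regime_label_py regime_counts → Spec_dominant_regime_label_py regime_counts (dominant_regime_label_py regime_counts)

-- ===== LEMMAS AND PROOFS =====

-- sum of the values
def pvSumv (l : List (String × Int)) : Int := (l.map (fun kv => kv.2)).sum
-- running max of the values starting from b
def pvVmax (l : List (String × Int)) (b : Int) : Int := l.foldl (fun a kv => max a kv.2) b
-- number of entries whose value is m
def pvCnt (l : List (String × Int)) (m : Int) : Nat := (l.filter (fun kv => kv.2 == m)).length
-- key of the first entry whose value is m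
def pvFkey (l : List (String × Int)) (m : Int) : String :=
  match l.find? (fun kv => kv.2 == m) with
  | some kv => kv.1
  | none => "flat"

theorem pvSumv_cons (kv : String × Int) (l : List (String × Int)) :
    pvSumv (kv :: l) = kv.2 + pvSumv l := by simp [pvSumv]

theorem pvVmax_cons (kv : String × Int) (l : List (String × Int)) (b : Int) :
    pvVmax (kv :: l) b = pvVmax l (max b kv.2) := rfl

theorem pvCnt_cons (kv : String × Int) (l : List (String × Int)) (m : Int) :
    pvCnt (kv :: l) m = (if kv.2 = m then 1 else 0) + pvCnt l m := by
  by_cases h : kv.2 = m <;> simp [pvCnt, h] <;> omega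

theorem pvFkey_cons (kv : String × Int) (l : List (String × Int)) (m : Int) :
    pvFkey (kv :: l) m = if kv.2 = m then kv.1 else pvFkey l m := by
  by_cases h : kv.2 = m <;> simp [pvFkey, List.find?_cons, h]

theorem pvVmax_ge (l : List (String × Int)) : ∀ b : Int, b ≤ pvVmax l b := by
  induction l with
  | nil => intro b; simp [pvVmax]
  | cons kv rest ih =>
    intro b
    have h1 : b ≤ max b kv.2 := le_max_left _ _
    have h2 := ih (max b kv.2)
    rw [pvVmax_cons]; omega

theorem pvVmax_mem_le (l : List (String × Int)) : ∀ (b : Int) (kv : String × Int), kv ∈ l → kv.2 ≤ pvVmax l b := by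
  induction l with
  | nil => intro b kv h; simp at h
  | cons hd rest ih =>
    intro b kv h
    rw [pvVmax_cons]
    rcases List.mem_cons.mp h with h | h
    · subst h
      have h1 : kv.2 ≤ max b kv.2 := le_max_right _ _
      have h2 := pvVmax_ge rest (max b kv.2)
      omega
    · exact ih _ _ h

theorem pvSumv_nonpos (l : List (String × Int)) (h : ∀ kv ∈ l, kv.2 ≤ 0) : pvSumv l ≤ 0 := by
  induction l with
  | nil => simp [pvSumv]
  | cons kv rest ih =>
    rw [pvSumv_cons]
    have h1 := h kv (List.mem_cons_self)
    have h2 := ih (fun kv' h' => h kv' (List.mem_cons_of_mem _ h'))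
    omega

-- invariant of B's loop once a best entry exists
theorem pvB_fold_some (l : List (String × Int)) :
    ∀ (t bv : Int) (bk : String) (lc : Nat),
      List.foldl pvB_step (t, some (bv, bk), lc) l =
        (t + pvSumv l,
         some (pvVmax l bv, if bv = pvVmax l bv then bk else pvFkey l (pvVmax l bv)),
         (if bv = pvVmax l bv then lc else 0) + pvCnt l (pvVmax l bv)) := by
  induction l with
  | nil => intro t bv bk lc; simp [pvSumv, pvVmax, pvCnt]
  | cons kv rest ih =>
    intro t bv bk lc
    rw [pvSumv_cons, pvVmax_cons, pvCnt_cons, pvFkey_cons]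
    by_cases hgt : bv < kv.2
    · have hmax : max bv kv.2 = kv.2 := by omega
      rw [hmax]
      have hne : ¬ bv = pvVmax rest kv.2 := by
        have := pvVmax_ge rest kv.2; omega
      have hstep : pvB_step (t, some (bv, bk), lc) kv = (t + kv.2, some (kv.2, kv.1), 1) := by
        simp [pvB_step, hgt]
      rw [List.foldl_cons, hstep, ih]
      simp only [Prod.mk.injEq, if_neg hne]
      exact ⟨by ring, trivial, by omega⟩
    · have hmax : max bv kv.2 = bv := by omega
      rw [hmax]
      by_cases heq : kv.2 = bv
      · have hstep : pvB_step (t, some (bv, bk), lc) kv = (t + kv.2, some (bv, bk), lc + 1) := by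
          simp [pvB_step, heq, hgt]
        rw [List.foldl_cons, hstep, ih]
        simp only [Prod.mk.injEq]
        refine ⟨by ring, ?_, ?_⟩ <;> by_cases hb : bv = pvVmax rest bv <;>
          first
          | (have hk : kv.2 = pvVmax rest bv := heq.trans hb
             simp only [if_pos hb, if_pos hk] <;> try omega)
          | (have hk : ¬ kv.2 = pvVmax rest bv := fun h => hb (heq ▸ h)
             simp only [if_neg hb, if_neg hk] <;> try omega)
      · have hstep : pvB_step (t, some (bv, bk), lc) kv = (t + kv.2, some (bv, bk), lc) := by
          simp [pvB_step, heq, hgt]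
        rw [List.foldl_cons, hstep, ih]
        have hk : ¬ kv.2 = pvVmax rest bv := by
          have := pvVmax_ge rest bv; omega
        simp only [Prod.mk.injEq, if_neg hk]
        refine ⟨by ring, trivial, ?_⟩
        by_cases hb : bv = pvVmax rest bv
        · simp only [if_pos hb]; omega
        · simp only [if_neg hb]; omega

-- find? is the head of filter
theorem pvFind_filter (l : List (String × Int)) (m : Int) :
    l.find? (fun kv => kv.2 == m) = (l.filter (fun kv => kv.2 == m)).head? := by
  induction l with
  | nil => simp
  | cons kv rest ih =>
    rw [List.find?_cons, List.filter_cons]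
    by_cases h : kv.2 = m
    · simp [h]
    · have hb : (kv.2 == m) = false := by simp [h]
      simp only [hb, if_false, Bool.false_eq_true]
      exact ih

theorem pvFkey_of_filter_single (l : List (String × Int)) (m : Int)
    (h : (l.filter (fun kv => kv.2 == m)).length = 1) :
    ((l.filter (fun kv => kv.2 == m)).map (fun kv => kv.1)).headI = pvFkey l m := by
  rcases hf : l.filter (fun kv => kv.2 == m) with _ | ⟨x, rest⟩
  · simp [hf] at h
  · rcases rest with _ | _
    · simp [pvFkey, pvFind_filter, hf]
    · simp [hf] at h

-- ===== VERDICT (by name: the statement is the Claim_ definition above) =====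
theorem dominant_regime_label_py_spec : Claim_equal_dominant_regime_label_py := by
  intro rc _
  unfold Spec_dominant_regime_label_py dominant_regime_label_py dominant_regime_label_py_alt
  rcases rc with _ | ⟨kv, rest⟩
  · rfl
  · have hsum : ((kv :: rest).map (fun kv => kv.2)).sum = pvSumv (kv :: rest) := rfl
    have hsc : pvSumv (kv :: rest) = kv.2 + pvSumv rest := pvSumv_cons kv rest
    have hfold : List.foldl pvB_step ((0 : Int), (none : Option (Int × String)), (0 : Nat)) (kv :: rest)
        = List.foldl pvB_step (kv.2, some (kv.2, kv.1), 1) rest := by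
      simp [List.foldl_cons, pvB_step]
    rw [hfold, pvB_fold_some]
    set M := pvVmax rest kv.2 with hM
    have hMvmax : pvVmax (kv :: rest) kv.2 = M := by rw [pvVmax_cons, max_self]
    by_cases hle : pvSumv (kv :: rest) ≤ 0
    · simp only [hsum]
      rw [if_pos hle, if_pos (by omega)]
    · simp only [hsum]
      rw [if_neg hle, if_neg (by omega)]
      have hmax : PySem.List.max? ((kv :: rest).map (fun kv => kv.2)) (fun v => v) = some M := by
        rw [List.map_cons, PySem.List.max?_id_cons, List.foldl_map]
        rfl
      rw [hmax]
      have hMpos : 0 < M := by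
        by_contra hnot
        apply hle
        apply pvSumv_nonpos
        intro kv' hmem
        have h1 : kv'.2 ≤ pvVmax (kv :: rest) kv.2 := pvVmax_mem_le _ kv.2 kv' hmem
        rw [hMvmax] at h1; omega
      have hfilter : (kv :: rest).filter (fun kv' => kv'.2 == M && decide (0 < kv'.2))
          = (kv :: rest).filter (fun kv' => kv'.2 == M) := by
        apply List.filter_congr
        intro kv' _
        by_cases h : kv'.2 = M <;> simp [h] <;> omega
      have hcnt : ((kv :: rest).filter (fun kv' => kv'.2 == M)).length = pvCnt (kv :: rest) M := rfl
      have hcnt2 : pvCnt (kv :: rest) M = (if kv.2 = M then 1 else 0) + pvCnt rest M :=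
        pvCnt_cons kv rest M
      simp only [hfilter, List.length_map, hcnt, hcnt2]
      by_cases hone : (if kv.2 = M then 1 else 0) + pvCnt rest M = 1
      · rw [if_neg (by omega : ¬ (if kv.2 = M then 1 else 0) + pvCnt rest M ≠ 1),
            if_neg (by omega : ¬ (if kv.2 = M then 1 else 0) + pvCnt rest M ≠ 1)]
        have hhead := pvFkey_of_filter_single (kv :: rest) M (by rw [hcnt, hcnt2]; omega)
        rw [hhead, pvFkey_cons]
      · rw [if_pos (by omega), if_pos (by omega)]
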